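-- pv_equiv track=rewrite | github.com/mkhi238/CSC384-A1 | solution.py | box_blocking_goal
-- ===== SOURCE A (Python) =====
-- def box_blocking_goal(box, goal, boxes, obstacles):
--     x1, y1 = box
--     x2, y2 = goal
--
--     if y1 == y2:
--         for x in range(min(x1, x2) + 1, max(x1, x2)):  # Exclude box and goal
--             if (x, y1) in boxes or (x,y1) in obstacles:
--                 return True
--
--     # Check vertical block (Same column, different rows)
--     if x1 == x2:
--         for y in range(min(y1, y2) + 1, max(y1, y2)):  # Exclude box and goal
--             if (x1, y) in boxes or (x1, y) in obstacles:
--                 return True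
--
--     return False  # No blocking box found
-- ===== SOURCE B (Python) =====
-- def box_blocking_goal(box, goal, boxes, obstacles):
--     # B: one pass over the blockers (boxes + obstacles), testing each against the
--     # open segment between box and goal, instead of scanning the segment cell-by-cell.
--     x1, y1 = box
--     x2, y2 = goal
--     lo_x, hi_x = min(x1, x2), max(x1, x2)
--     lo_y, hi_y = min(y1, y2), max(y1, y2)
--     return any(
--         (y1 == y2 and by == y1 and lo_x < bx < hi_x)
--         or (x1 == x2 and bx == x1 and lo_y < by < hi_y)
--         for (bx, by) in list(boxes) + list(obstacles)
--     )
-- ===== Notes on version B (the rewrite author's own statement) =====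
-- stated objective: alternative
-- what changed: B iterates once over the blocker list (boxes + obstacles) testing each cell against the open segment between box and goal, instead of A's scan over every coordinate of the segment with membership tests into the lists.
import Mathlib
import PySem

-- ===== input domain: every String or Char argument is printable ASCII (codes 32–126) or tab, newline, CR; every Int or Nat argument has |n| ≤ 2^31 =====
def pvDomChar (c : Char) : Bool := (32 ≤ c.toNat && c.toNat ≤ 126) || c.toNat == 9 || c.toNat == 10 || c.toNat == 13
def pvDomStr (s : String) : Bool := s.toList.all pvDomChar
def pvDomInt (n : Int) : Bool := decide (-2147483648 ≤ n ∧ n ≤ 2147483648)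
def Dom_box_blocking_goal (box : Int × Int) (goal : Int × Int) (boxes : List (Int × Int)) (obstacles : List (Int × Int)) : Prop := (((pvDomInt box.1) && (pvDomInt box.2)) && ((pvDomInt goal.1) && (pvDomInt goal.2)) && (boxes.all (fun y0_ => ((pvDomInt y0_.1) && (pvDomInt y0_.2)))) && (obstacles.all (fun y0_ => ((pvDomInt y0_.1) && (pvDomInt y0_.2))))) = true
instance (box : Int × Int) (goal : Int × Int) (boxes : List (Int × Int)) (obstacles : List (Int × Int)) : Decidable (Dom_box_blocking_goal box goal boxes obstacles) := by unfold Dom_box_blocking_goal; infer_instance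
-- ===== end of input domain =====

-- B replaces A's cell-by-cell scan of the segment with a single pass over the
-- blocker list, testing each blocker against the open segment (alternative algorithm).


-- ===== PORT A =====
-- A: if on the same row, scan x over the open interval, returning True on the first
-- blocked cell; then the same for a shared column; else False.
def box_blocking_goal (box : Int × Int) (goal : Int × Int) (boxes : List (Int × Int)) (obstacles : List (Int × Int)) : Bool :=
  let x1 := box.1; let y1 := box.2
  let x2 := goal.1; let y2 := goal.2
  if y1 = y2 ∧ (PySem.List.pyRange (min x1 x2 + 1) (max x1 x2) 1).any
      (fun x => boxes.contains (x, y1) || obstacles.contains (x, y1)) then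
    true
  else if x1 = x2 ∧ (PySem.List.pyRange (min y1 y2 + 1) (max y1 y2) 1).any
      (fun y => boxes.contains (x1, y) || obstacles.contains (x1, y)) then
    true
  else
    false

-- ===== PORT B =====
-- B: one pass over boxes ++ obstacles, testing each blocker against the open segment.
def box_blocking_goal_alt (box : Int × Int) (goal : Int × Int) (boxes : List (Int × Int)) (obstacles : List (Int × Int)) : Bool :=
  let x1 := box.1; let y1 := box.2
  let x2 := goal.1; let y2 := goal.2
  let loX := min x1 x2; let hiX := max x1 x2
  let loY := min y1 y2; let hiY := max y1 y2
  (boxes ++ obstacles).any (fun p =>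
    (decide (y1 = y2) && decide (p.2 = y1) && decide (loX < p.1) && decide (p.1 < hiX))
    || (decide (x1 = x2) && decide (p.1 = x1) && decide (loY < p.2) && decide (p.2 < hiY)))

-- ===== PRECONDITION & SPEC =====
def Spec_box_blocking_goal (box : Int × Int) (goal : Int × Int) (boxes : List (Int × Int)) (obstacles : List (Int × Int)) (out : Bool) : Prop := out = box_blocking_goal_alt box goal boxes obstacles
instance (box : Int × Int) (goal : Int × Int) (boxes : List (Int × Int)) (obstacles : List (Int × Int)) (out : Bool) : Decidable (Spec_box_blocking_goal box goal boxes obstacles out) := by unfold Spec_box_blocking_goal; infer_instance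

-- ===== CLAIM (what is proved, stated in full; the proofs are below) =====
def Claim_equal_box_blocking_goal : Prop := ∀ (box : Int × Int) (goal : Int × Int) (boxes : List (Int × Int)) (obstacles : List (Int × Int)), Dom_box_blocking_goal box goal boxes obstacles → Spec_box_blocking_goal box goal boxes obstacles (box_blocking_goal box goal boxes obstacles)

-- ===== LEMMAS AND PROOFS =====

theorem bbg_eq (box : Int × Int) (goal : Int × Int) (boxes : List (Int × Int)) (obstacles : List (Int × Int)) :
    box_blocking_goal box goal boxes obstacles = box_blocking_goal_alt box goal boxes obstacles := by
  obtain ⟨x1, y1⟩ := box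
  obtain ⟨x2, y2⟩ := goal
  simp only [box_blocking_goal]
  split_ifs with h1 h2
  · obtain ⟨hy, hany⟩ := h1
    rw [List.any_eq_true] at hany
    obtain ⟨x, hxmem, hcond⟩ := hany
    rw [PySem.List.mem_pyRange_one] at hxmem
    simp only [List.contains_eq_mem, Bool.or_eq_true, decide_eq_true_eq] at hcond
    symm
    simp only [box_blocking_goal_alt, List.any_eq_true]
    refine ⟨(x, y1), List.mem_append.mpr hcond, ?_⟩
    simp only [Bool.or_eq_true, Bool.and_eq_true, decide_eq_true_eq]
    exact Or.inl ⟨⟨⟨hy, trivial⟩, by omega⟩, by omega⟩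
  · obtain ⟨hx, hany⟩ := h2
    rw [List.any_eq_true] at hany
    obtain ⟨y, hymem, hcond⟩ := hany
    rw [PySem.List.mem_pyRange_one] at hymem
    simp only [List.contains_eq_mem, Bool.or_eq_true, decide_eq_true_eq] at hcond
    symm
    simp only [box_blocking_goal_alt, List.any_eq_true]
    refine ⟨(x1, y), List.mem_append.mpr hcond, ?_⟩
    simp only [Bool.or_eq_true, Bool.and_eq_true, decide_eq_true_eq]
    exact Or.inr ⟨⟨⟨hx, trivial⟩, by omega⟩, by omega⟩
  · symm
    simp only [box_blocking_goal_alt]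
    rw [List.any_eq_false]
    rintro ⟨px, py⟩ hmem
    simp only [Bool.or_eq_true, Bool.and_eq_true, decide_eq_true_eq, not_or]
    constructor
    · rintro ⟨⟨⟨hy, hpy⟩, hlo⟩, hhi⟩
      apply h1
      refine ⟨hy, List.any_eq_true.mpr ⟨px, PySem.List.mem_pyRange_one.mpr ⟨by omega, by omega⟩, ?_⟩⟩
      simp only [List.contains_eq_mem, Bool.or_eq_true, decide_eq_true_eq]
      simpa [← hpy] using List.mem_append.mp hmem
    · rintro ⟨⟨⟨hx, hpx⟩, hlo⟩, hhi⟩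
      apply h2
      refine ⟨hx, List.any_eq_true.mpr ⟨py, PySem.List.mem_pyRange_one.mpr ⟨by omega, by omega⟩, ?_⟩⟩
      simp only [List.contains_eq_mem, Bool.or_eq_true, decide_eq_true_eq]
      simpa [← hpx] using List.mem_append.mp hmem

-- ===== VERDICT (by name: the statement is the Claim_ definition above) =====
theorem box_blocking_goal_spec : Claim_equal_box_blocking_goal := by
  intro box goal boxes obstacles _
  unfold Spec_box_blocking_goal
  exact bbg_eq box goal boxes obstacles
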